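-- pv_equiv track=rewrite | github.com/dmitriyvechorko/BSUIR | sem4/AOIS/lab3/mc_cluskey_minimization.py | remove_unnecessary_mc_cluskey
-- ===== SOURCE A (Python) =====
-- from typing import Tuple, List
--
-- def remove_unnecessary_mc_cluskey(mc_cluskey_matrix: List[List[str]]) -> List[int]:
--     removed_indexes = []
--     while True:
--         for implicate_index in range(len(mc_cluskey_matrix)):
--             if can_be_removed(mc_cluskey_matrix, implicate_index):
--                 mc_cluskey_matrix.remove(mc_cluskey_matrix[implicate_index])
--                 removed_indexes.append(implicate_index)
--                 break
--         else:
--             return removed_indexes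
--
-- def can_be_removed(mc_cluskey_matrix: List[List[str]], implicate_index: int) -> bool:
--     for column_index in range(len(mc_cluskey_matrix[0])):
--         if mc_cluskey_matrix[implicate_index][column_index] != "+":
--             continue
--         intersection_amount = 0
--         for string_index in range(len(mc_cluskey_matrix)):
--             if string_index == implicate_index:
--                 continue
--             if mc_cluskey_matrix[string_index][column_index] == "+":
--                 intersection_amount += 1
--         if intersection_amount == 0:
--             return False
--     return True
-- ===== SOURCE B (Python) =====
-- from typing import List
--
-- def remove_unnecessary_mc_cluskey(mc_cluskey_matrix: List[List[str]]) -> List[int]: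
--     rows = list(mc_cluskey_matrix)
--     ncols = max(map(len, rows), default=0)
--     # per-column '+' counts over the rows still alive
--     counts = [sum(1 for row in rows if c < len(row) and row[c] == "+") for c in range(ncols)]
--     removed = []
--     while True:
--         found = -1
--         for i, row in enumerate(rows):
--             # removable iff every '+' column is covered by at least one other row
--             if all(counts[c] > 1 for c in range(len(row)) if row[c] == "+"):
--                 found = i
--                 break
--         if found < 0:
--             return removed
--         row = rows.pop(found)
--         counts = [counts[c] - (1 if c < len(row) and row[c] == "+" else 0) for c in range(ncols)]
--         removed.append(found)
-- ===== Notes on version B (the rewrite author's own statement) =====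
-- stated objective: alternative
-- what changed: B keeps incrementally updated per-column '+' counts over the alive rows, so a row's removability is a single scan of that row against the counts instead of A's per-column re-count of all other rows, and it removes the found row by index instead of re-searching it by value.
-- outside the precondition, e.g. on remove_unnecessary_mc_cluskey([['+'], ['x'], ['x', 'x', '+']]): A returns [1, 1], B returns [1]
import Mathlib
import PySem

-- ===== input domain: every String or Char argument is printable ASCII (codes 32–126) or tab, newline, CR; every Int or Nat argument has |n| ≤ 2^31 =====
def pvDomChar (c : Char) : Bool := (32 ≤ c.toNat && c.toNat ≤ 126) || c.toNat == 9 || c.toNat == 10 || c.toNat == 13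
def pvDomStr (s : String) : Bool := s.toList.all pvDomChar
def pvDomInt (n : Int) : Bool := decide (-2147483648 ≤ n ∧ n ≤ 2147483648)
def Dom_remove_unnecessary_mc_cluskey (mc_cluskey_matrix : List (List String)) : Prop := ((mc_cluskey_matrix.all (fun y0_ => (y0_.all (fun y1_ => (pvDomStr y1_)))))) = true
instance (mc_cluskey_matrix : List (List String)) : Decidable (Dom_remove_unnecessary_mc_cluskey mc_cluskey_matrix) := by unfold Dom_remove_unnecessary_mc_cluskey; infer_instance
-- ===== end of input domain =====

-- B replaces A's per-column re-scan of all other rows by per-column '+' counts maintained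
-- incrementally, and removes the found row by index instead of by value (an alternative
-- algorithm; not measured faster on random inputs).  NOTE: Python A mutates its argument in
-- place (removes rows); B works on a copy — the equivalence proved here is about the RETURN
-- value only.

-- termination helpers for the two ports (cited by their decreasing_by)
lemma pvFind_range_lt {n i : Nat} {p : Nat → Bool}
    (h : (List.range n).find? p = some i) : i < n := by
  have := List.mem_of_find?_eq_some h
  simpa [List.mem_range] using this

lemma pvRemove_getD_length_lt {α : Type} [BEq α] [LawfulBEq α] (m : List α) (x : α)
    (h : 0 < m.length) : ((PySem.List.remove? m x).getD []).length < m.length := by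
  rcases hidx : List.idxOf? x m with _ | k
  · simpa [PySem.List.remove?, hidx] using h
  · obtain ⟨hk, -, -⟩ := List.idxOf?_eq_some_iff.mp hidx
    simp [PySem.List.remove?, hidx, List.length_eraseIdx, hk]
    omega

-- ===== PORT A =====
-- can_be_removed: for each column of the first row's width, if this row has '+' there,
-- count '+' of the other rows in that column; False on a zero count, else True.
def canBeRemovedA (m : List (List String)) (i : Nat) : Bool :=
  (List.range ((m.getD 0 []).length)).all (fun c =>
    if ((m.getD i []).getD c "") ≠ "+" then true
    else ((List.range m.length).foldl (fun acc s =>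
        if s = i then acc
        else if ((m.getD s []).getD c "") = "+" then acc + 1 else acc) (0 : Nat)) ≠ 0)

-- the 'while True' loop: find the first removable row, list.remove() it, record its index.
def loopA (m : List (List String)) : List Int :=
  match h : (List.range m.length).find? (fun i => canBeRemovedA m i) with
  | none => []
  | some i =>
      (i : Int) :: loopA ((PySem.List.remove? m (m.getD i [])).getD [])
termination_by m.length
decreasing_by
  exact pvRemove_getD_length_lt m (m.getD i []) (Nat.zero_lt_of_lt (pvFind_range_lt h))

def remove_unnecessary_mc_cluskey (mc_cluskey_matrix : List (List String)) : List Int :=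
  loopA mc_cluskey_matrix

-- ===== PORT B =====
-- removable iff every '+' column of the row has alive-count > 1
def removableB (counts : List Int) (row : List String) : Bool :=
  (List.range row.length).all (fun c =>
    if row.getD c "" = "+" then counts.getD c 0 > 1 else true)

-- the while loop of Source B: find first removable row, pop it, decrement its '+' columns.
def loopB (ncols : Nat) (rows : List (List String)) (counts : List Int) : List Int :=
  match h : (List.range rows.length).find? (fun i => removableB counts (rows.getD i [])) with
  | none => []
  | some i =>
      let row := rows.getD i []
      (i : Int) :: loopB ncols (rows.eraseIdx i)
        ((List.range ncols).map (fun c =>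
          counts.getD c 0 - if c < row.length ∧ row.getD c "" = "+" then 1 else 0))
termination_by rows.length
decreasing_by
  have hi : i < rows.length := pvFind_range_lt h
  simp [List.length_eraseIdx, hi]
  omega

def remove_unnecessary_mc_cluskey_alt (mc_cluskey_matrix : List (List String)) : List Int :=
  let ncols := mc_cluskey_matrix.foldl (fun a row => max a row.length) 0
  let counts := (List.range ncols).map (fun c =>
    (mc_cluskey_matrix.map (fun row =>
      if c < row.length ∧ row.getD c "" = "+" then (1 : Int) else 0)).sum)
  loopB ncols mc_cluskey_matrix counts

-- ===== PRECONDITION & SPEC =====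
-- Pre_ excludes ragged matrices (rows of unequal length) that contain a '+': there A's column
-- window is the CURRENT first row's length, which shifts as rows are removed — it raises
-- IndexError on most such inputs and its value on the rest is an accident of removal order;
-- B counts over every column of every row, the natural reading of a coverage table.
def Pre_remove_unnecessary_mc_cluskey (mc_cluskey_matrix : List (List String)) : Prop :=
  (∀ row ∈ mc_cluskey_matrix, row.length = (mc_cluskey_matrix.getD 0 []).length)
    ∨ (∀ row ∈ mc_cluskey_matrix, ∀ s ∈ row, s ≠ "+")
instance (mc_cluskey_matrix : List (List String)) : Decidable (Pre_remove_unnecessary_mc_cluskey mc_cluskey_matrix) := by unfold Pre_remove_unnecessary_mc_cluskey; infer_instance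

def pvWitness_remove_unnecessary_mc_cluskey : List (List String) :=
  [["+", "+"], ["+", ""]]

def Spec_remove_unnecessary_mc_cluskey (mc_cluskey_matrix : List (List String)) (out : List Int) : Prop := out = remove_unnecessary_mc_cluskey_alt mc_cluskey_matrix
instance (mc_cluskey_matrix : List (List String)) (out : List Int) : Decidable (Spec_remove_unnecessary_mc_cluskey mc_cluskey_matrix out) := by unfold Spec_remove_unnecessary_mc_cluskey; infer_instance

-- ===== CLAIM (what is proved, stated in full; the proofs are below) =====
def Claim_equal_remove_unnecessary_mc_cluskey : Prop := ∀ (mc_cluskey_matrix : List (List String)), Dom_remove_unnecessary_mc_cluskey mc_cluskey_matrix → Pre_remove_unnecessary_mc_cluskey mc_cluskey_matrix → Spec_remove_unnecessary_mc_cluskey mc_cluskey_matrix (remove_unnecessary_mc_cluskey mc_cluskey_matrix)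

-- ===== LEMMAS AND PROOFS =====

-- the bounds guard in Source B's comprehensions is redundant: out of range, getD gives "" ≠ "+"
lemma pvGuard (row : List String) (c : Nat) :
    (c < row.length ∧ row.getD c "" = "+") ↔ (row.getD c "" = "+") := by
  constructor
  · exact fun h => h.2
  · intro h
    refine ⟨?_, h⟩
    by_contra hge
    rw [List.getD_eq_default _ _ (Nat.le_of_not_lt hge)] at h
    exact absurd h (by decide)

-- the column-c '+'-count over the alive rows (the value B's counts list holds at c)
def colSum (m : List (List String)) (c : Nat) : Int :=
  (m.map (fun row => if c < row.length ∧ row.getD c "" = "+" then (1 : Int) else 0)).sum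

lemma colSum_eq_countP (m : List (List String)) (c : Nat) :
    colSum m c = (m.countP (fun row => row.getD c "" = "+") : Int) := by
  have h := PySem.List.sum_map_ite_one_zero
    (fun row => decide (c < row.length ∧ row.getD c "" = "+")) m
  simp only [decide_eq_true_eq] at h
  rw [colSum, h]
  norm_cast
  exact List.countP_congr (fun row _ => by simpa using (pvGuard row c))

-- member-restricted congruence for Bool.all / find? over the same list
lemma pvAll_congr_mem {α : Type} {l : List α} {p q : α → Bool}
    (h : ∀ a ∈ l, p a = q a) : l.all p = l.all q := by
  induction l with
  | nil => rfl
  | cons a t ih => simp_all [List.all_cons]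

lemma pvFind_congr_mem {α : Type} {l : List α} {p q : α → Bool}
    (h : ∀ a ∈ l, p a = q a) : l.find? p = l.find? q := by
  induction l with
  | nil => rfl
  | cons a t ih =>
    simp only [List.find?]
    rw [h a (List.mem_cons_self)]
    cases q a
    · exact ih (fun b hb => h b (List.mem_cons_of_mem a hb))
    · rfl

-- A's inner fold counts the indices s ≠ i whose row has '+' at column c
lemma pvFold_count {P : Nat → Prop} [DecidablePred P] {i : Nat} : ∀ (l : List Nat) (a : Nat),
    l.foldl (fun acc s => if s = i then acc else if P s then acc + 1 else acc) a
      = a + l.countP (fun s => !(s = i) && decide (P s)) := by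
  intro l
  induction l with
  | nil => simp
  | cons b t ih =>
    intro a
    simp only [List.foldl_cons, List.countP_cons]
    by_cases hb : b = i
    · simp [hb, ih]
    · by_cases hq : P b <;> simp [hb, hq, ih] <;> omega

-- dropping one occurrence of i from a nodup list drops exactly its contribution
lemma pvCountP_ne (l : List Nat) (i : Nat) (hnd : l.Nodup) (hi : i ∈ l)
    (P : Nat → Prop) [DecidablePred P] :
    l.countP (fun s => !(s = i) && decide (P s)) + (if P i then 1 else 0)
      = l.countP (fun s => decide (P s)) := by
  have hperm := List.perm_cons_erase (l := l) (a := i) hi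
  rw [(hperm.countP_eq _), (hperm.countP_eq _)]
  simp only [List.countP_cons]
  have : (l.erase i).countP (fun s => !(s = i) && decide (P s))
      = (l.erase i).countP (fun s => decide (P s)) := by
    apply List.countP_congr
    intro x hx
    have hxne : x ≠ i := ((List.Nodup.mem_erase_iff hnd).mp hx).1
    simp [hxne]
  rw [this]
  by_cases hq : P i <;> simp [hq]

-- countP over the index range equals countP over the rows themselves
lemma pvCountP_range (m : List (List String)) (p : List String → Bool) :
    (List.range m.length).countP (fun s => p (m.getD s [])) = m.countP p := by
  have hmap : (List.range m.length).map (fun s => m.getD s []) = m := by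
    apply List.ext_getElem
    · simp
    · intro i h1 h2
      simp [List.getElem?_eq_getElem h2]
  conv_rhs => rw [← hmap]
  rw [List.countP_map]
  rfl

-- A's inner counting fold, additively: fold + (this row's indicator) = countP over all rows
lemma foldA_char (m : List (List String)) (i c : Nat) (hi : i < m.length) :
    ((List.range m.length).foldl (fun acc s =>
        if s = i then acc
        else if ((m.getD s []).getD c "") = "+" then acc + 1 else acc) (0 : Nat))
      + (if ((m.getD i []).getD c "") = "+" then 1 else 0)
      = m.countP (fun row => row.getD c "" = "+") := by
  rw [pvFold_count, Nat.zero_add,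
    pvCountP_ne _ i List.nodup_range (List.mem_range.mpr hi)
      (fun s => (m.getD s []).getD c "" = "+")]
  exact pvCountP_range m (fun row => decide (row.getD c "" = "+"))

-- pointwise equality of the two removability tests (rows all of width ncols)
lemma canBeRemoved_eq (m : List (List String)) (ncols i : Nat)
    (hnc : (m.getD 0 []).length = ncols) (hleni : (m.getD i []).length = ncols)
    (hi : i < m.length) :
    canBeRemovedA m i
      = removableB ((List.range ncols).map (fun c => colSum m c)) (m.getD i []) := by
  unfold canBeRemovedA removableB
  rw [hnc, hleni]
  apply pvAll_congr_mem
  intro c hc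
  have hclt : c < ncols := List.mem_range.mp hc
  rw [PySem.List.getD_map_range _ _ _ _ hclt]
  by_cases hp : ((m.getD i []).getD c "") = "+"
  · rw [if_neg (not_not_intro hp), if_pos hp]
    have hchar := foldA_char m i c hi
    rw [if_pos hp] at hchar
    rw [colSum_eq_countP, decide_eq_decide]
    omega
  · rw [if_pos hp, if_neg hp]

-- removing the first removable row by VALUE removes it by INDEX: no earlier equal row exists
lemma remove_eq_eraseIdx (m : List (List String)) (i : Nat) (hi : i < m.length)
    (hfirst : ∀ j < i, (m.getD j []) ≠ (m.getD i [])) :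
    (PySem.List.remove? m (m.getD i [])).getD [] = m.eraseIdx i := by
  have hidx : List.idxOf? (m.getD i []) m = some i := by
    rw [List.idxOf?_eq_some_iff]
    refine ⟨hi, (List.getD_eq_getElem m [] hi).symm, ?_⟩
    intro j hj
    have := hfirst j hj
    rw [List.getD_eq_getElem m [] (Nat.lt_trans hj hi)] at this
    exact fun hcontra => this hcontra
  simp only [PySem.List.remove?, ← List.getD_eq_getElem?_getD, hidx, Option.map, Option.getD]

lemma colSum_eraseIdx (m : List (List String)) (i c : Nat) (hi : i < m.length) :
    colSum (m.eraseIdx i) c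
      = colSum m c
        - (if c < (m.getD i []).length ∧ ((m.getD i []).getD c "") = "+" then 1 else 0) := by
  have hrow : m.getD i [] = m[i] := List.getD_eq_getElem m [] hi
  generalize hr : m.getD i [] = r
  rw [hrow] at hr
  have hm : m = m.take i ++ r :: m.drop (i + 1) := by
    rw [← hr, List.getElem_cons_drop hi, List.take_append_drop]
  rw [List.eraseIdx_eq_take_drop_succ]
  conv_rhs => rw [hm]
  simp only [colSum, List.map_append, List.sum_append, List.map_cons, List.sum_cons]
  ring

-- the main loop equivalence on rectangular matrices, by induction on the row count
lemma loop_eq (n : Nat) : ∀ (m : List (List String)) (ncols : Nat), m.length ≤ n →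
    (∀ row ∈ m, row.length = ncols) →
    loopA m = loopB ncols m ((List.range ncols).map (fun c => colSum m c)) := by
  induction n with
  | zero =>
    intro m ncols hlen _
    have hm : m = [] := List.eq_nil_of_length_eq_zero (Nat.le_zero.mp hlen)
    subst hm
    rw [loopA.eq_def, loopB.eq_def]
    rfl
  | succ n ih =>
    intro m ncols hlen hrect
    by_cases hm : m = []
    · subst hm
      rw [loopA.eq_def, loopB.eq_def]
      rfl
    · have hnc : (m.getD 0 []).length = ncols := by
        cases m with
        | nil => exact absurd rfl hm
        | cons a t => exact hrect a List.mem_cons_self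
      have hgetDlen : ∀ i < m.length, (m.getD i []).length = ncols := by
        intro i hi
        rw [List.getD_eq_getElem m [] hi]
        exact hrect _ (List.getElem_mem hi)
      have hfind := pvFind_congr_mem (l := List.range m.length)
        (p := fun i => canBeRemovedA m i)
        (q := fun i => removableB ((List.range ncols).map (fun c => colSum m c)) (m.getD i []))
        (fun s hs => canBeRemoved_eq m ncols s hnc
          (hgetDlen s (List.mem_range.mp hs)) (List.mem_range.mp hs))
      rw [loopA.eq_def, loopB.eq_def, ← hfind]
      cases hf : (List.range m.length).find? (fun i => canBeRemovedA m i) with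
      | none => rfl
      | some i =>
        -- facts from find?: i < length, removable, minimal
        obtain ⟨hcan, k, hk, hki, hmin⟩ := List.find?_eq_some_iff_getElem.mp hf
        rw [List.getElem_range] at hki
        replace hki := hki.symm
        subst hki
        have hi : i < m.length := by simpa using hk
        have hmin' : ∀ j < i, canBeRemovedA m j = false := by
          intro j hj
          have := hmin j hj
          rw [List.getElem_range] at this
          simpa using this
        -- no earlier row equals row i (equal rows are equally removable)
        have hfirst : ∀ j < i, (m.getD j []) ≠ (m.getD i []) := by
          intro j hj heq
          have hj' : j < m.length := Nat.lt_trans hj hi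
          have h1 := canBeRemoved_eq m ncols j hnc (hgetDlen j hj') hj'
          have h2 := canBeRemoved_eq m ncols i hnc (hgetDlen i hi) hi
          rw [heq, ← h2] at h1
          rw [hmin' j hj, hcan] at h1
          exact Bool.false_ne_true h1
        show (i : Int) :: loopA ((PySem.List.remove? m (m.getD i [])).getD [])
          = (i : Int) :: loopB ncols (m.eraseIdx i) ((List.range ncols).map (fun c =>
              (((List.range ncols).map (fun c => colSum m c)).getD c 0
                - if c < (m.getD i []).length ∧ (m.getD i []).getD c "" = "+" then 1 else 0)))
        rw [remove_eq_eraseIdx m i hi hfirst]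
        -- the incrementally updated counts are exactly the counts of the smaller matrix
        have hcounts : ((List.range ncols).map (fun c =>
            (((List.range ncols).map (fun c => colSum m c)).getD c 0
              - if c < (m.getD i []).length ∧ (m.getD i []).getD c "" = "+" then 1 else 0)))
            = (List.range ncols).map (fun c => colSum (m.eraseIdx i) c) := by
          apply List.map_congr_left
          intro c hc
          rw [PySem.List.getD_map_range _ _ _ _ (List.mem_range.mp hc),
            colSum_eraseIdx m i c hi]
        have hlen' : (m.eraseIdx i).length ≤ n := by
          rw [List.length_eraseIdx]
          simp only [hi, if_pos]
          omega
        have hrect' : ∀ row ∈ m.eraseIdx i, row.length = ncols :=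
          fun row hrow => hrect row (List.mem_of_mem_eraseIdx hrow)
        rw [ih (m.eraseIdx i) ncols hlen' hrect']
        simp only [hcounts]

-- on a matrix with no '+' at all, every first row is removable: both loops emit 0s in lockstep
lemma loop_noplus : ∀ (m : List (List String)), (∀ row ∈ m, ∀ s ∈ row, s ≠ "+") →
    ∀ (ncols : Nat) (counts : List Int), loopA m = loopB ncols m counts := by
  intro m
  induction m with
  | nil =>
    intro _ ncols counts
    rw [loopA.eq_def, loopB.eq_def]
    rfl
  | cons a t ih =>
    intro hnp ncols counts
    have hentry : ∀ (r : List String), r ∈ (a :: t) → ∀ c, r.getD c "" ≠ "+" := by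
      intro r hr c
      by_cases hc : c < r.length
      · rw [List.getD_eq_getElem r "" hc]
        exact hnp r hr _ (List.getElem_mem hc)
      · rw [List.getD_eq_default _ _ (Nat.le_of_not_lt hc)]
        decide
    have hcanA : canBeRemovedA (a :: t) 0 = true := by
      unfold canBeRemovedA
      rw [List.all_eq_true]
      intro c hc
      rw [if_pos (hentry _ (by simp) c)]
    have hcanB : removableB counts ((a :: t).getD 0 []) = true := by
      unfold removableB
      rw [List.all_eq_true]
      intro c hc
      rw [if_neg (hentry _ (by simp) c)]
    have hfindA : (List.range (a :: t).length).find? (fun i => canBeRemovedA (a :: t) i)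
        = some 0 := by
      rw [List.length_cons, List.range_succ_eq_map]
      exact List.find?_cons_of_pos hcanA
    have hfindB : (List.range (a :: t).length).find?
        (fun i => removableB counts ((a :: t).getD i [])) = some 0 := by
      rw [List.length_cons, List.range_succ_eq_map]
      exact List.find?_cons_of_pos hcanB
    rw [loopA.eq_def, loopB.eq_def, hfindA, hfindB]
    have hrm : (PySem.List.remove? (a :: t) ((a :: t).getD 0 [])).getD [] = t := by
      have := remove_eq_eraseIdx (a :: t) 0 (by simp) (by intro j hj; omega)
      simpa using this
    show (0 : Int) :: loopA ((PySem.List.remove? (a :: t) ((a :: t).getD 0 [])).getD [])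
      = (0 : Int) :: loopB ncols ((a :: t).eraseIdx 0) _
    rw [hrm]
    show _ = (0 : Int) :: loopB ncols t _
    rw [ih (fun r hr => hnp r (List.mem_cons_of_mem a hr)) ncols _]

-- the max row length B starts from equals the common width on a rectangular matrix
lemma pvFoldMax (m : List (List String)) (ncols : Nat) (hm : m ≠ [])
    (hrect : ∀ row ∈ m, row.length = ncols) :
    m.foldl (fun a row => max a row.length) 0 = ncols := by
  have : ∀ (l : List (List String)) (a : Nat), (∀ row ∈ l, row.length = ncols) → a ≤ ncols →
      (l.foldl (fun a row => max a row.length) a = ncols ∨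
       (l = [] ∧ l.foldl (fun a row => max a row.length) a = a)) := by
    intro l
    induction l with
    | nil => intro a _ _; exact Or.inr ⟨rfl, rfl⟩
    | cons b u ihl =>
      intro a hr ha
      have hb : b.length = ncols := hr b List.mem_cons_self
      have := ihl (max a b.length) (fun r hrm => hr r (List.mem_cons_of_mem b hrm))
        (by omega)
      rcases this with h | ⟨hu, hfold⟩
      · exact Or.inl (by simpa using h)
      · subst hu
        simp only [List.foldl_cons, List.foldl_nil]
        left
        omega
  rcases this m 0 hrect (Nat.zero_le _) with h | ⟨hnil, _⟩
  · exact h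
  · exact absurd hnil hm

-- ===== VERDICT (by name: the statement is the Claim_ definition above) =====
theorem remove_unnecessary_mc_cluskey_spec : Claim_equal_remove_unnecessary_mc_cluskey := by
  intro m _ hpre
  unfold Spec_remove_unnecessary_mc_cluskey remove_unnecessary_mc_cluskey
    remove_unnecessary_mc_cluskey_alt
  rcases hpre with hrect | hnp
  · by_cases hm : m = []
    · subst hm
      rw [loopA.eq_def, loopB.eq_def]
      rfl
    · rw [pvFoldMax m _ hm hrect]
      exact loop_eq m.length m _ le_rfl hrect
  · exact loop_noplus m hnp _ _
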